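-- pv_equiv track=rewrite | github.com/phillipgreenii/adventofcode | 2022/day10/__init__.py | render_signal_to_crt
-- ===== SOURCE A (Python) =====
-- def chunk_signal(signal, size):
--     return [ signal[i:i+size] for i in range(0, len(signal), size) ]
--
-- def render_signal_to_crt(signal, width=40, height=6):
--     crt = [[' '] *width for i in range(height)]
--
--     # this is a bit of a hack; it seems that this code uses the position of
--     # the signal to mark the value at the end of the cycle, but the problem
--     # refers to it during the cycle.  It seems in practices this results in
--     # an off by one. Therefor, the remaining item gets lopped off
--     trimmed_signal = signal[:(width*height)]
--     for y, chunk in enumerate(chunk_signal(trimmed_signal, width)):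
--         for x,s in enumerate(chunk):
--             if s-1 <= x <= s+1:
--                 crt[y][x] = '#'
--             else:
--                 crt[y][x] = '.'
--
--
--     return '\n'.join([ ''.join(r) for r in crt ])
-- ===== SOURCE B (Python) =====
-- def render_signal_to_crt(sig, width=40, height=6):
--     # One pass over a flat buffer instead of chunking into rows with nested loops.
--     n = max(width, 0) * max(height, 0)
--     crt = [' '] * n
--     for i, s in enumerate(sig[:n]):
--         crt[i] = '#' if abs(s - i % width) <= 1 else '.'
--     return '\n'.join(''.join(crt[y * width:(y + 1) * width]) for y in range(height))
-- ===== Notes on version B (the rewrite author's own statement) =====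
-- stated objective: simpler
-- what changed: Replaces A's chunk-signal-into-rows plus nested per-row/per-column loops over a 2-D grid by a single pass over a flat width*height buffer using i % width index arithmetic, slicing the rows back out at the end.
import Mathlib
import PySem

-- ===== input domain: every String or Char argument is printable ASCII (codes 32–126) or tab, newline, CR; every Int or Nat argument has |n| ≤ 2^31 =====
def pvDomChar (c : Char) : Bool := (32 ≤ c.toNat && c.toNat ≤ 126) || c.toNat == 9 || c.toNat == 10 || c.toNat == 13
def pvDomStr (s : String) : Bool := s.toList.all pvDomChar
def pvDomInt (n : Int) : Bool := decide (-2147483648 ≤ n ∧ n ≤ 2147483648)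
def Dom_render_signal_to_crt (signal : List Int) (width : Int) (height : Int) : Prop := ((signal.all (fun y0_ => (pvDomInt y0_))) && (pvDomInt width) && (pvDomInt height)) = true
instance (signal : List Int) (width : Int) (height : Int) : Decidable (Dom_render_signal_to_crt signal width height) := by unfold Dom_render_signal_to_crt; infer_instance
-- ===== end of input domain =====

-- B replaces A's chunk-into-rows nested loops by one pass over a flat width*height buffer
-- with index arithmetic (i % width), then slices the rows back out (objective: simpler).

-- ===== PORT A =====
def chunk_signal (signal : List Int) (size : Int) : List (List Int) :=
  (PySem.List.pyRange 0 (signal.length : Int) size).map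
    (fun i => PySem.List.slice signal (some i) (some (i + size)))

def render_signal_to_crt (signal : List Int) (width : Int) (height : Int) : String :=
  let crt : List (List Char) :=
    (PySem.List.pyRange 0 height 1).map (fun _ => PySem.List.pyRepeat [' '] width)
  let trimmed := PySem.List.slice signal none (some (width * height))
  let crt :=
    (PySem.List.enumerate (chunk_signal trimmed width) 0).foldl
      (fun crt yc =>
        (PySem.List.enumerate yc.2 0).foldl
          (fun crt xs =>
            PySem.List.pySetD crt yc.1
              (PySem.List.pySetD (PySem.List.pyGetD crt yc.1 [])
                xs.1 (if xs.2 - 1 ≤ xs.1 ∧ xs.1 ≤ xs.2 + 1 then '#' else '.')))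
          crt)
      crt
  String.ofList (PySem.Chars.join ['\n']
    (crt.map (fun r => PySem.Chars.join [] (r.map (fun c => [c])))))

-- ===== PORT B =====
def render_signal_to_crt_alt (signal : List Int) (width : Int) (height : Int) : String :=
  let n := max width 0 * max height 0
  let crt0 := PySem.List.pyRepeat [' '] n
  let crt :=
    (PySem.List.enumerate (PySem.List.slice signal none (some n)) 0).foldl
      (fun crt is =>
        PySem.List.pySetD crt is.1
          (if |is.2 - PySem.Int.mod is.1 width| ≤ 1 then '#' else '.'))
      crt0
  String.ofList (PySem.Chars.join ['\n']
    ((PySem.List.pyRange 0 height 1).map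
      (fun y => PySem.List.slice crt (some (y * width)) (some ((y + 1) * width)))))

-- ===== PRECONDITION & SPEC =====
-- Pre_ excludes exactly the inputs on which A raises: width = 0 (range step 0 → ValueError)
-- and width > 0 ∧ height < 0 with a signal long enough that the trimmed slice is nonempty
-- (crt is then empty → IndexError).
def Pre_render_signal_to_crt (signal : List Int) (width : Int) (height : Int) : Prop :=
  width ≠ 0 ∧ ¬(0 < width ∧ height < 0 ∧ 0 < (signal.length : Int) + width * height)
instance (signal : List Int) (width : Int) (height : Int) : Decidable (Pre_render_signal_to_crt signal width height) := by unfold Pre_render_signal_to_crt; infer_instance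
def pvWitness_render_signal_to_crt : List Int × Int × Int := ([0, 1, 2, 3, 4, 5], 3, 2)

def Spec_render_signal_to_crt (signal : List Int) (width : Int) (height : Int) (out : String) : Prop := out = render_signal_to_crt_alt signal width height
instance (signal : List Int) (width : Int) (height : Int) (out : String) : Decidable (Spec_render_signal_to_crt signal width height out) := by unfold Spec_render_signal_to_crt; infer_instance

-- ===== CLAIM (what is proved, stated in full; the proofs are below) =====
def Claim_equal_render_signal_to_crt : Prop := ∀ (signal : List Int) (width : Int) (height : Int), Dom_render_signal_to_crt signal width height → Pre_render_signal_to_crt signal width height → Spec_render_signal_to_crt signal width height (render_signal_to_crt signal width height)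


-- ===== LEMMAS AND PROOFS =====

-- A's mark and B's mark, as named functions (proof-side abbreviations)
def pvGA (i s : ℤ) : Char := if s - 1 ≤ i ∧ i ≤ s + 1 then '#' else '.'
def pvGB (W : ℤ) (i s : ℤ) : Char := if |s - PySem.Int.mod i W| ≤ 1 then '#' else '.'

theorem pv_take_succ_set {α : Type} (row : List α) (s : ℕ) (v : α) (hs : s < row.length) :
    (row.set s v).take (s+1) = row.take s ++ [v] := by
  apply List.ext_getElem
  · simp; omega
  · intro i h1 h2
    simp only [List.getElem_take, List.getElem_set]
    rcases Nat.lt_or_ge i s with hlt | hge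
    · have hlen1 : i < (List.take s row).length := by simp [List.length_take]; omega
      rw [List.getElem_append_left hlen1, List.getElem_take]
      exact if_neg (by omega)
    · have hie : i = s := by simp at h1; omega
      subst hie
      rw [List.getElem_append_right (by simp [List.length_take])]
      simp [List.length_take, Nat.min_eq_left (le_of_lt hs)]

theorem pv_drop_set_gt {α : Type} (row : List α) (s m : ℕ) (v : α) (hm : s < m) :
    (row.set s v).drop m = row.drop m := by
  apply List.ext_getElem
  · simp
  · intro i h1 h2
    simp only [List.getElem_drop, List.getElem_set]
    have : s ≠ m + i := by omega
    simp [this]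

theorem pv_pySetD_nil {α : Type} (i : ℤ) (v : α) : PySem.List.pySetD ([] : List α) i v = [] := by
  apply List.eq_nil_of_length_eq_zero
  simp [PySem.List.length_pySetD]

-- the single-write fold (B's loop, and A's inner loop on a row)
theorem pv_foldl_write {α : Type} (g : ℤ → ℤ → α) :
    ∀ (xs : List ℤ) (s : ℕ) (row : List α), s + xs.length ≤ row.length →
    (PySem.List.enumerate xs (s:ℤ)).foldl (fun r p => PySem.List.pySetD r p.1 (g p.1 p.2)) row
      = row.take s ++ (PySem.List.enumerate xs (s:ℤ)).map (fun p => g p.1 p.2)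
          ++ row.drop (s + xs.length) := by
  intro xs
  induction xs with
  | nil => intro s row _; simp [PySem.List.enumerate_nil]
  | cons x xs ih =>
    intro s row hlen
    rw [PySem.List.enumerate_cons]
    simp only [List.foldl_cons, List.map_cons]
    have hs : s < row.length := by simp at hlen; omega
    rw [PySem.List.pySetD_natCast]
    have hcast : (s:ℤ) + 1 = ((s+1 : ℕ) : ℤ) := by push_cast; ring
    rw [hcast, ih (s+1) (row.set s (g (↑s) x)) (by simp at hlen ⊢; omega)]
    rw [pv_take_succ_set row s _ hs, pv_drop_set_gt row s (s+1+xs.length) _ (by omega)]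
    simp only [← hcast]
    have h2 : s + 1 + xs.length = s + (xs.length + 1) := by omega
    rw [h2]
    simp [List.append_assoc]

-- A's inner loop, written on the full grid, only rewrites row y
theorem pv_inner_to_row (g : ℤ → ℤ → Char) (yn : ℕ) :
    ∀ (ch : List ℤ) (s : ℤ) (crt : List (List Char)) (h : yn < crt.length),
    (PySem.List.enumerate ch s).foldl
        (fun crt q => PySem.List.pySetD crt (yn:ℤ)
          (PySem.List.pySetD (PySem.List.pyGetD crt (yn:ℤ) []) q.1 (g q.1 q.2))) crt
      = crt.set yn ((PySem.List.enumerate ch s).foldl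
          (fun r q => PySem.List.pySetD r q.1 (g q.1 q.2)) crt[yn]) := by
  intro ch
  induction ch with
  | nil => intro s crt h; simp [PySem.List.enumerate_nil]
  | cons c ch ih =>
    intro s crt h
    rw [PySem.List.enumerate_cons]
    simp only [List.foldl_cons]
    rw [PySem.List.pyGetD_natCast, List.getD_eq_getElem crt [] h,
        PySem.List.pySetD_natCast]
    rw [ih (s+1) _ (by simp only [List.length_set]; exact h)]
    rw [List.getElem_set_self, List.set_set]

-- A's outer loop turns the grid into rows processed independently
theorem pv_outer (g : ℤ → ℤ → Char) :
    ∀ (chs : List (List ℤ)) (s : ℕ) (crt : List (List Char)), s + chs.length ≤ crt.length →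
    (PySem.List.enumerate chs (s:ℤ)).foldl
        (fun crt p => (PySem.List.enumerate p.2 0).foldl
          (fun crt q => PySem.List.pySetD crt p.1
            (PySem.List.pySetD (PySem.List.pyGetD crt p.1 []) q.1 (g q.1 q.2))) crt) crt
      = crt.take s
        ++ List.zipWith (fun row ch =>
              (PySem.List.enumerate ch 0).foldl
                (fun r q => PySem.List.pySetD r q.1 (g q.1 q.2)) row) (crt.drop s) chs
        ++ crt.drop (s + chs.length) := by
  intro chs
  induction chs with
  | nil => intro s crt _; simp [PySem.List.enumerate_nil]
  | cons c chs ih =>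
    intro s crt hlen
    rw [PySem.List.enumerate_cons]
    simp only [List.foldl_cons]
    have hs : s < crt.length := by simp at hlen; omega
    rw [pv_inner_to_row g s c 0 crt hs]
    have hcast : (s:ℤ) + 1 = ((s+1 : ℕ) : ℤ) := by push_cast; ring
    rw [hcast, ih (s+1) _ (by simp at hlen ⊢; omega)]
    rw [pv_take_succ_set crt s _ hs, pv_drop_set_gt crt s (s+1+chs.length) _ (by omega),
        pv_drop_set_gt crt s (s+1) _ (by omega),
        List.drop_eq_getElem_cons hs, List.zipWith_cons_cons]
    have h2 : s + 1 + chs.length = s + (chs.length + 1) := by omega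
    rw [h2]
    simp [List.append_assoc]

theorem pv_zipWith_replicate {α β : Type} (f : List α → β → List α) (b : List α) :
    ∀ (l : List β) (H : ℕ), l.length ≤ H →
    List.zipWith f (List.replicate H b) l = l.map (f b) := by
  intro l
  induction l with
  | nil => intro H _; simp
  | cons x xs ih =>
    intro H hH
    cases H with
    | zero => simp at hH
    | succ H => simp [List.replicate_succ, ih H (by simp at hH; omega)]

theorem pv_slice_nil {α : Type} (a b : Option ℤ) : PySem.List.slice ([] : List α) a b = [] := by
  cases a with
  | none =>
    cases b with
    | none => exact PySem.List.slice_none_none []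
    | some b' =>
      by_cases hb : 0 ≤ b'
      · simp [PySem.List.slice_to _ hb]
      · have hb' : b' = -(((-b').toNat : ℕ) : ℤ) := by omega
        rw [hb', PySem.List.slice_to_neg_natCast _ _ (by omega)]
        simp
  | some a' =>
    apply List.eq_nil_of_length_eq_zero
    cases b with
    | none =>
      rw [PySem.List.slice_some_none]
      simp
    | some b' =>
      rw [PySem.List.length_slice]
      have h1 := PySem.List.clampIdx_le ([] : List α).length b'
      have h2 := PySem.List.clampIdx_le ([] : List α).length a'
      simp only [List.length_nil] at h1 h2 ⊢
      omega

-- width < 0: every row of the grid is [], and the nested loops change nothing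
theorem pv_set_nil_self (crt : List (List Char)) (hcrt : ∀ r ∈ crt, r = ([] : List Char))
    (k : ℕ) : crt.set k ([] : List Char) = crt := by
  apply List.ext_getElem
  · simp
  · intro i h1 h2
    simp only [List.getElem_set]
    have := hcrt crt[i] (List.getElem_mem h2)
    split_ifs <;> simp [this]

theorem pv_getD_all_nil (crt : List (List Char)) (hcrt : ∀ r ∈ crt, r = ([] : List Char))
    (k : ℕ) : crt.getD k ([] : List Char) = [] := by
  by_cases h : k < crt.length
  · rw [List.getD_eq_getElem crt [] h]
    exact hcrt _ (List.getElem_mem h)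
  · rw [List.getD_eq_default]
    omega

theorem pv_inner_all_nil (g : ℤ → ℤ → Char) (yn : ℕ) :
    ∀ (ch : List ℤ) (s : ℤ) (crt : List (List Char)), (∀ r ∈ crt, r = ([] : List Char)) →
    (PySem.List.enumerate ch s).foldl
        (fun crt q => PySem.List.pySetD crt (yn:ℤ)
          (PySem.List.pySetD (PySem.List.pyGetD crt (yn:ℤ) []) q.1 (g q.1 q.2))) crt
      = crt := by
  intro ch
  induction ch with
  | nil => intro s crt _; simp [PySem.List.enumerate_nil]
  | cons c ch ih =>
    intro s crt hcrt
    rw [PySem.List.enumerate_cons]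
    simp only [List.foldl_cons]
    rw [PySem.List.pyGetD_natCast, pv_getD_all_nil crt hcrt yn, pv_pySetD_nil,
        PySem.List.pySetD_natCast, pv_set_nil_self crt hcrt yn]
    exact ih (s+1) crt hcrt

theorem pv_outer_all_nil (g : ℤ → ℤ → Char) :
    ∀ (chs : List (List ℤ)) (s : ℕ) (crt : List (List Char)), (∀ r ∈ crt, r = ([] : List Char)) →
    (PySem.List.enumerate chs (s:ℤ)).foldl
        (fun crt p => (PySem.List.enumerate p.2 0).foldl
          (fun crt q => PySem.List.pySetD crt p.1
            (PySem.List.pySetD (PySem.List.pyGetD crt p.1 []) q.1 (g q.1 q.2))) crt) crt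
      = crt := by
  intro chs
  induction chs with
  | nil => intro s crt _; simp [PySem.List.enumerate_nil]
  | cons c chs ih =>
    intro s crt hcrt
    rw [PySem.List.enumerate_cons]
    simp only [List.foldl_cons]
    rw [pv_inner_all_nil g s c 0 crt hcrt]
    have hcast : (s:ℤ) + 1 = ((s+1 : ℕ) : ℤ) := by push_cast; ring
    rw [hcast]
    exact ih (s+1) crt hcrt

-- ceiling-division facts for K = ⌈n/W⌉
theorem pv_ceil_le (n W H : ℕ) (hW : 0 < W) (hn : n ≤ W * H) : (n + W - 1) / W ≤ H := by
  have h1 : n + W - 1 < (H+1) * W := by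
    have : (H+1) * W = H * W + W := by ring
    rw [this]
    have : W * H = H * W := Nat.mul_comm W H
    omega
  have := (Nat.div_lt_iff_lt_mul hW).2 h1
  omega

theorem pv_le_ceil_mul (n W : ℕ) (hW : 0 < W) : n ≤ ((n + W - 1) / W) * W := by
  have hd := Nat.div_add_mod (n + W - 1) W
  have hm : (n + W - 1) % W < W := Nat.mod_lt _ hW
  have hc : W * ((n + W - 1) / W) = ((n + W - 1) / W) * W := Nat.mul_comm _ _
  omega


-- specializations at start index 0
theorem pv_foldl_write0 {α : Type} (g : ℤ → ℤ → α) (xs : List ℤ) (row : List α)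
    (h : xs.length ≤ row.length) :
    (PySem.List.enumerate xs 0).foldl (fun r p => PySem.List.pySetD r p.1 (g p.1 p.2)) row
      = (PySem.List.enumerate xs 0).map (fun p => g p.1 p.2) ++ row.drop xs.length := by
  have h2 := pv_foldl_write g xs 0 row (by omega)
  simpa using h2

theorem pv_outer0 (g : ℤ → ℤ → Char) (chs : List (List ℤ)) (crt : List (List Char))
    (h : chs.length ≤ crt.length) :
    (PySem.List.enumerate chs 0).foldl
        (fun crt p => (PySem.List.enumerate p.2 0).foldl
          (fun crt q => PySem.List.pySetD crt p.1
            (PySem.List.pySetD (PySem.List.pyGetD crt p.1 []) q.1 (g q.1 q.2))) crt) crt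
      = List.zipWith (fun row ch =>
            (PySem.List.enumerate ch 0).foldl
              (fun r q => PySem.List.pySetD r q.1 (g q.1 q.2)) row) crt chs
        ++ crt.drop chs.length := by
  have h2 := pv_outer g chs 0 crt (by omega)
  simpa using h2

theorem pv_outer_all_nil0 (g : ℤ → ℤ → Char) (chs : List (List ℤ)) (crt : List (List Char))
    (hcrt : ∀ r ∈ crt, r = ([] : List Char)) :
    (PySem.List.enumerate chs 0).foldl
        (fun crt p => (PySem.List.enumerate p.2 0).foldl
          (fun crt q => PySem.List.pySetD crt p.1
            (PySem.List.pySetD (PySem.List.pyGetD crt p.1 []) q.1 (g q.1 q.2))) crt) crt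
      = crt := by
  have h2 := pv_outer_all_nil g chs 0 crt hcrt
  simpa using h2

-- the main case: width > 0, height ≥ 0
theorem pv_drop_replicate {α : Type} (n m : ℕ) (a : α) :
    (List.replicate n a).drop m = List.replicate (n - m) a := by
  apply List.ext_getElem
  · simp
  · intro i h1 h2
    simp [List.getElem_replicate]

theorem pv_main (signal : List ℤ) (W H : ℕ) (hW : 0 < W) :
    render_signal_to_crt signal (W:ℤ) (H:ℤ) = render_signal_to_crt_alt signal (W:ℤ) (H:ℤ) := by
  have hT : PySem.List.slice signal none (some ((W:ℤ)*(H:ℤ))) = signal.take (W*H) := by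
    have e : (W:ℤ)*(H:ℤ) = ((W*H:ℕ):ℤ) := by push_cast; ring
    rw [e, PySem.List.slice_to _ (Int.natCast_nonneg _), Int.toNat_natCast]
  set T := signal.take (W*H) with hTdef
  have hnT : T.length ≤ W*H := by simp [hTdef]
  set K := (T.length + W - 1)/W with hK
  have hKH : K ≤ H := pv_ceil_le T.length W H hW hnT
  have hKW : T.length ≤ K*W := pv_le_ceil_mul T.length W hW
  have hchunks : chunk_signal T (W:ℤ) = (List.range K).map (fun k => (T.drop (k*W)).take W) := by
    unfold chunk_signal
    rw [PySem.List.pyRange_of_pos _ _ (by exact_mod_cast hW : (0:ℤ) < (W:ℤ))]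
    have hb : (if (0:ℤ) < ((T.length:ℤ)) then ((((T.length:ℤ)) - 0 + (W:ℤ) - 1)/(W:ℤ)).toNat else 0) = K := by
      by_cases h0 : 0 < T.length
      · rw [if_pos (by exact_mod_cast h0)]
        have e : ((T.length:ℤ)) - 0 + (W:ℤ) - 1 = ((T.length + W - 1 : ℕ):ℤ) := by omega
        rw [e, ← Int.natCast_div, Int.toNat_natCast]
      · rw [if_neg (by omega)]
        have h00 : T.length = 0 := by omega
        rw [hK, h00]
        rw [Nat.div_eq_of_lt (by omega)]
    rw [hb, List.map_map]
    apply List.map_congr_left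
    intro k hk
    simp only [Function.comp]
    have e1 : (0:ℤ) + (W:ℤ)*(k:ℤ) = ((k*W:ℕ):ℤ) := by push_cast; ring
    rw [e1]
    exact PySem.List.slice_natCast_add T (k*W) W
  have hcrt0A : (PySem.List.pyRange 0 (H:ℤ) 1).map (fun _ => PySem.List.pyRepeat [' '] (W:ℤ))
      = List.replicate H (List.replicate W ' ') := by
    simp only [PySem.List.pyRepeat_singleton, Int.toNat_natCast, PySem.List.pyRange_one,
      List.map_map, Function.comp_def, List.map_const', List.length_range]
    simp
  have hmax : max ((W:ℤ)) 0 * max ((H:ℤ)) 0 = ((W*H:ℕ):ℤ) := by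
    rw [max_eq_left (Int.natCast_nonneg W), max_eq_left (Int.natCast_nonneg H)]
    push_cast; ring
  have hTB : PySem.List.slice signal none (some ((W*H:ℕ):ℤ)) = T := by
    rw [PySem.List.slice_to _ (Int.natCast_nonneg _), Int.toNat_natCast]
  simp only [render_signal_to_crt, render_signal_to_crt_alt]
  rw [hT, hmax, hTB, hchunks, hcrt0A, PySem.List.pyRepeat_singleton, Int.toNat_natCast]
  rw [pv_outer0 (fun i s => if s - 1 ≤ i ∧ i ≤ s + 1 then '#' else '.') _ _
        (by simp [hKH])]
  rw [pv_zipWith_replicate _ _ _ H (by simp [hKH])]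
  rw [pv_foldl_write0 (fun i s => if |s - PySem.Int.mod i (W:ℤ)| ≤ 1 then '#' else '.') T _
        (by simp; omega)]
  apply congrArg String.ofList
  have hid : ∀ rows : List (List Char),
      rows.map (fun r => PySem.Chars.join [] (r.map (fun c => [c]))) = rows := by
    intro rows
    have hjr : ∀ r ∈ rows, PySem.Chars.join [] (r.map (fun c => [c])) = r := by
      intro r _; exact PySem.Chars.join_nil_singletons r
    rw [List.map_congr_left hjr, List.map_id']
  rw [List.map_append, hid, hid]
  apply congrArg (PySem.Chars.join ['\n'])
  rw [pv_drop_replicate]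
  set M := (PySem.List.enumerate T 0).map
      (fun p => if |p.2 - PySem.Int.mod p.1 (W:ℤ)| ≤ 1 then '#' else '.') with hM
  have hMlen : M.length = T.length := by simp [hM]
  set buffer := M ++ (List.replicate (W*H) ' ').drop T.length with hbuf
  have hbuflen : buffer.length = W*H := by simp [hbuf, hMlen]; omega
  have hcell : ∀ (i : ℕ) (hiWH : i < W*H) (hib : i < buffer.length),
      buffer[i] = if h : i < T.length then
        (if |T[i]'h - (((i % W : ℕ)):ℤ)| ≤ 1 then '#' else '.') else ' ' := by
    intro i hiWH hib
    by_cases hi : i < T.length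
    · rw [dif_pos hi]
      simp only [hbuf]
      rw [List.getElem_append_left (by omega)]
      simp only [hM]
      rw [List.getElem_map]
      rw [PySem.List.getElem_enumerate T 0 i (by simpa using hi)]
      simp only [zero_add]
      have hmod : PySem.Int.mod ((i:ℕ):ℤ) (W:ℤ) = ((i % W : ℕ):ℤ) := by
        rw [PySem.Int.mod_eq_emod_of_pos (by exact_mod_cast hW : (0:ℤ) < (W:ℤ))]
        exact (Int.natCast_mod i W).symm
      rw [hmod]
    · rw [dif_neg hi]
      simp only [hbuf]
      rw [List.getElem_append_right (by omega)]
      simp [hMlen]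
  rw [PySem.List.pyRange_one 0 (H:ℤ)]
  apply List.ext_getElem
  · simp
    omega
  · intro y hy1 hy2
    have hyH : y < H := by simpa using hy2
    have hyW : (y+1)*W ≤ H*W := Nat.mul_le_mul_right W (by omega)
    have hyW' : (y+1)*W = y*W + W := by ring
    have hWH : W*H = H*W := Nat.mul_comm W H
    simp only [List.getElem_map, List.getElem_range]
    have e1 : ((0:ℤ) + (y:ℤ)) * (W:ℤ) = ((y*W:ℕ):ℤ) := by push_cast; ring
    have e2 : ((0:ℤ) + (y:ℤ) + 1) * (W:ℤ) = ((y*W:ℕ):ℤ) + ((W:ℕ):ℤ) := by push_cast; ring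
    rw [e1, e2, PySem.List.slice_natCast_add]
    by_cases hyK : y < K
    · rw [List.getElem_append_left (by simpa using hyK)]
      simp only [List.getElem_map, List.getElem_range]
      rw [pv_foldl_write0 (fun i s => if s - 1 ≤ i ∧ i ≤ s + 1 then '#' else '.') _ _
            (by simp)]
      have hchlen : ((T.drop (y*W)).take W).length = min W (T.length - y*W) := by simp
      apply List.ext_getElem
      · simp [hbuflen]
        omega
      · intro x hx1 hx2
        have hxW : x < W := by simp [hbuflen] at hx2; omega
        rw [List.getElem_take, List.getElem_drop]
        rw [hcell (y*W + x) (by omega) (by omega)]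
        by_cases hxm : x < min W (T.length - y*W)
        · rw [List.getElem_append_left
            (by simp only [List.length_map, PySem.List.length_enumerate, hchlen]; omega)]
          rw [List.getElem_map]
          rw [PySem.List.getElem_enumerate _ 0 x
            (by simp only [PySem.List.length_enumerate, hchlen]; omega)]
          simp only [zero_add]
          have hxlt : y*W + x < T.length := by omega
          rw [dif_pos hxlt]
          have hyWx : y*W + x = W*y + x := by ring
          have hmx : (y*W + x) % W = x := by
            rw [hyWx, Nat.mul_add_mod]
            exact Nat.mod_eq_of_lt hxW
          rw [hmx]
          have hchx : ((T.drop (y*W)).take W)[x]'(by rw [hchlen]; omega) = T[y*W + x]'hxlt := by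
            rw [List.getElem_take, List.getElem_drop]
          rw [hchx]
          have hiff : (T[y*W + x]'hxlt - 1 ≤ (x:ℤ) ∧ (x:ℤ) ≤ T[y*W + x]'hxlt + 1)
              ↔ |T[y*W + x]'hxlt - (x:ℤ)| ≤ 1 := by
            rw [abs_le]; omega
          exact if_congr hiff rfl rfl
        · rw [List.getElem_append_right
            (by simp only [List.length_map, PySem.List.length_enumerate, hchlen]; omega)]
          have hxge : T.length ≤ y*W + x := by omega
          rw [dif_neg (by omega)]
          simp [List.getElem_replicate]
    · rw [List.getElem_append_right (by simpa using hyK)]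
      simp only [List.getElem_replicate]
      have hyKW : K*W ≤ y*W := Nat.mul_le_mul_right W (by omega)
      apply List.ext_getElem
      · simp [hbuflen]
        omega
      · intro x hx1 hx2
        have hxW : x < W := by simpa using hx1
        rw [List.getElem_take, List.getElem_drop]
        rw [hcell (y*W + x) (by omega) (by omega)]
        rw [dif_neg (by omega)]
        simp [List.getElem_replicate]


-- width > 0, height < 0-- width > 0, height < 0-- width > 0, height < 0, trimmed slice empty (guaranteed by Pre_)
theorem pv_negheight (signal : List ℤ) (width height : ℤ) (hw : 0 < width) (hh : height < 0)
    (hlen : (signal.length : ℤ) + width * height ≤ 0) :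
    render_signal_to_crt signal width height = render_signal_to_crt_alt signal width height := by
  have hwh : width * height < 0 := mul_neg_of_pos_of_neg hw hh
  have h1 : PySem.List.pyRange 0 height 1 = [] := by
    rw [PySem.List.pyRange_one]
    have e : (height - 0).toNat = 0 := by omega
    rw [e]
    rfl
  have h2 : PySem.List.slice signal none (some (width*height)) = [] := by
    have e : width*height = -(((-(width*height)).toNat : ℕ) : ℤ) := by omega
    rw [e, PySem.List.slice_to_neg_natCast signal _ (by omega)]
    have e2 : signal.length - (-(width*height)).toNat = 0 := by omega
    rw [e2, List.take_zero]
  have h3 : max width 0 * max height 0 = (0:ℤ) := by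
    rw [show max height 0 = (0:ℤ) from by omega, mul_zero]
  have h4 : PySem.List.slice signal none (some (0:ℤ)) = [] := by
    rw [PySem.List.slice_to _ le_rfl]
    simp
  have h5 : chunk_signal [] width = [] := by
    unfold chunk_signal
    simp only [List.length_nil, Nat.cast_zero]
    rw [PySem.List.pyRange_of_pos _ _ hw]
    simp
  simp only [render_signal_to_crt, render_signal_to_crt_alt]
  rw [h2, h5, h3, h4, h1]
  simp [PySem.List.enumerate_nil]

theorem pv_negwidth (signal : List ℤ) (width height : ℤ) (hw : width < 0) :
    render_signal_to_crt signal width height = render_signal_to_crt_alt signal width height := by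
  have hrep : PySem.List.pyRepeat [' '] width = ([] : List Char) := by
    rw [PySem.List.pyRepeat_singleton]
    have e : width.toNat = 0 := by omega
    rw [e]
    rfl
  simp only [render_signal_to_crt, render_signal_to_crt_alt, hrep]
  have hnil : ∀ r ∈ (PySem.List.pyRange 0 height 1).map (fun _ => ([] : List Char)),
      r = ([] : List Char) := by
    intro r hr
    rcases List.mem_map.1 hr with ⟨a, _, h⟩
    exact h.symm
  rw [pv_outer_all_nil0 (fun i s => if s - 1 ≤ i ∧ i ≤ s + 1 then '#' else '.') _ _ hnil]
  by_cases hh : 0 < height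
  · have h3 : max width 0 * max height 0 = (0:ℤ) := by
      rw [show max width 0 = (0:ℤ) from by omega, zero_mul]
    have h4 : PySem.List.slice signal none (some (0:ℤ)) = [] := by
      rw [PySem.List.slice_to _ le_rfl]
      simp
    rw [h3, h4]
    simp only [PySem.List.pyRepeat_singleton, Int.toNat_zero, List.replicate_zero,
      PySem.List.enumerate_nil, List.foldl_nil]
    apply congrArg String.ofList
    apply congrArg (PySem.Chars.join ['\n'])
    rw [List.map_map]
    apply List.map_congr_left
    intro a _
    simp only [Function.comp]
    rw [pv_slice_nil]
    simp
  · have h1 : PySem.List.pyRange 0 height 1 = [] := by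
      rw [PySem.List.pyRange_one]
      have e : (height - 0).toNat = 0 := by omega
      rw [e]
      rfl
    rw [h1]
    simp

-- ===== VERDICT (by name: the statement is the Claim_ definition above) =====
theorem render_signal_to_crt_spec : Claim_equal_render_signal_to_crt := by
  intro signal width height _ hpre
  unfold Pre_render_signal_to_crt at hpre
  unfold Spec_render_signal_to_crt
  obtain ⟨hw0, hnot⟩ := hpre
  rcases lt_trichotomy width 0 with hw | hw | hw
  · exact pv_negwidth signal width height hw
  · exact absurd hw hw0
  · by_cases hh : 0 ≤ height
    · have hWw : width = ((width.toNat : ℕ) : ℤ) := by omega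
      have hHh : height = ((height.toNat : ℕ) : ℤ) := by omega
      rw [hWw, hHh]
      exact pv_main signal width.toNat height.toNat (by omega)
    · have hlen : (signal.length : ℤ) + width * height ≤ 0 := by
        by_contra hc
        exact hnot ⟨hw, by omega, by omega⟩
      exact pv_negheight signal width height hw (by omega) hlen
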